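-- pv_equiv track=rewrite | github.com/heleownae/AlQuerythm | 029회차/mock_test_LHW.py | solution
-- ===== SOURCE A (Python) =====
-- def solution(answers):
--     score = [0, 0, 0]
--
--     a = [1, 2, 3, 4, 5]
--     b = [2, 1, 2, 3, 2, 4, 2, 5]
--     c = [3, 3, 1, 1, 2, 2, 4, 4, 5, 5]
--
--     for i, answer in enumerate(answers):
--         if answer == a[i % len(a)]:
--             score[0] += 1
--         if answer == b[i % len(b)]:
--             score[1] += 1
--         if answer == c[i % len(c)]:
--             score[2] += 1
--
--     maxscore = max(score)
--     result = [i + 1 for i, score in enumerate(score) if score == maxscore]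
--
--     return result
-- ===== SOURCE B (Python) =====
-- def _score(answers, pattern):
--     # rotating-queue pass: walk answers once, rotating the pattern by one each step
--     s = 0
--     cyc = pattern
--     for ans in answers:
--         if ans == cyc[0]:
--             s += 1
--         cyc = cyc[1:] + cyc[:1]
--     return s
--
--
-- def solution(answers):
--     patterns = [[1, 2, 3, 4, 5],
--                 [2, 1, 2, 3, 2, 4, 2, 5],
--                 [3, 3, 1, 1, 2, 2, 4, 4, 5, 5]]
--     scores = [_score(answers, p) for p in patterns]
--     maxscore = max(scores)
--     return [i + 1 for i, s in enumerate(scores) if s == maxscore]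
-- ===== Notes on version B (the rewrite author's own statement) =====
-- stated objective: alternative
-- what changed: A counts all three supervisors in one interleaved indexed scan (i % len(pattern) lookups); B scores each pattern in its own pass with a rotating-queue (pattern rotated by one per answer, no index arithmetic), then assembles the three scores.
import Mathlib
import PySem

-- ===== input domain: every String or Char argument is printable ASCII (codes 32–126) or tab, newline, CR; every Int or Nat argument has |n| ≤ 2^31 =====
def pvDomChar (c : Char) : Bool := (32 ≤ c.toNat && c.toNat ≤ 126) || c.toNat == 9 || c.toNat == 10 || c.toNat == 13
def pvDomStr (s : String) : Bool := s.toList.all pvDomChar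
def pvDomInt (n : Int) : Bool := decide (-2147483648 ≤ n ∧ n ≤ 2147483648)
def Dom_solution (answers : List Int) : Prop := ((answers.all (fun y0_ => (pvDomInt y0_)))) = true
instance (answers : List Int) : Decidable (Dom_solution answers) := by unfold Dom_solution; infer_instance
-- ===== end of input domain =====

-- B replaces A's single interleaved indexed scan with three independent rotating-queue
-- passes (one per fixed pattern), no index arithmetic; objective: alternative decomposition.


-- ===== PORT A =====
-- A's three fixed patterns
def pvPatA : List Int := [1, 2, 3, 4, 5]
def pvPatB : List Int := [2, 1, 2, 3, 2, 4, 2, 5]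
def pvPatC : List Int := [3, 3, 1, 1, 2, 2, 4, 4, 5, 5]

-- the single interleaved loop `for i, answer in enumerate(answers)` updating score[0..2]
def pvALoop : List Int → Nat → Int × Int × Int → Int × Int × Int
  | [], _, s => s
  | answer :: rest, i, (s0, s1, s2) =>
      pvALoop rest (i + 1)
        ((if answer = pvPatA.getD (i % pvPatA.length) 0 then s0 + 1 else s0),
         (if answer = pvPatB.getD (i % pvPatB.length) 0 then s1 + 1 else s1),
         (if answer = pvPatC.getD (i % pvPatC.length) 0 then s2 + 1 else s2))

def solution (answers : List Int) : List Int :=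
  let s := pvALoop answers 0 (0, 0, 0)
  let score : List Int := [s.1, s.2.1, s.2.2]
  let maxscore := max s.1 (max s.2.1 s.2.2)   -- max(score) of the 3-element list
  (PySem.List.enumerate score).filterMap
    (fun p => if p.2 = maxscore then some (p.1 + 1) else none)

-- ===== PORT B =====
-- _score: one pass over answers, rotating the pattern queue by one each step
def pvBScore : List Int → List Int → Int → Int
  | [], _, s => s
  | ans :: rest, cyc, s =>
      pvBScore rest (cyc.drop 1 ++ cyc.take 1) (if ans = cyc.getD 0 0 then s + 1 else s)

def solution_alt (answers : List Int) : List Int :=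
  let patterns : List (List Int) :=
    [[1, 2, 3, 4, 5], [2, 1, 2, 3, 2, 4, 2, 5], [3, 3, 1, 1, 2, 2, 4, 4, 5, 5]]
  let scores := patterns.map (fun p => pvBScore answers p 0)
  let maxscore := (PySem.List.max? scores (fun x => x)).getD 0
  (PySem.List.enumerate scores).filterMap
    (fun p => if p.2 = maxscore then some (p.1 + 1) else none)

-- ===== PRECONDITION & SPEC =====
def Spec_solution (answers : List Int) (out : List Int) : Prop := out = solution_alt answers
instance (answers : List Int) (out : List Int) : Decidable (Spec_solution answers out) := by unfold Spec_solution; infer_instance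

-- ===== CLAIM (what is proved, stated in full; the proofs are below) =====
def Claim_equal_solution : Prop := ∀ (answers : List Int), Dom_solution answers → Spec_solution answers (solution answers)

-- ===== LEMMAS AND PROOFS =====

-- one B rotation step = List.rotate by 1
lemma rot_step (l : List Int) : l.drop 1 ++ l.take 1 = l.rotate 1 := by
  cases l with
  | nil => simp
  | cons a t => simp [List.rotate_cons_succ]

-- head of the rotated pattern = indexed access of the original pattern
lemma rot_head (pat : List Int) (hne : pat ≠ []) (i : Nat) :
    (pat.rotate i).getD 0 0 = pat.getD (i % pat.length) 0 := by
  have hlen : 0 < pat.length := List.length_pos_iff.mpr hne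
  have h0 : 0 < (pat.rotate i).length := by simpa using hlen
  have hi : i % pat.length < pat.length := Nat.mod_lt _ hlen
  rw [List.getD_eq_getElem _ _ h0, List.getD_eq_getElem _ _ hi]
  simp [List.getElem_rotate]

-- the interleaved A loop started at index i equals three rotating-queue passes
lemma loop_eq_scores (answers : List Int) : ∀ (i : Nat) (s0 s1 s2 : Int),
    pvALoop answers i (s0, s1, s2) =
      (pvBScore answers (pvPatA.rotate i) s0,
       pvBScore answers (pvPatB.rotate i) s1,
       pvBScore answers (pvPatC.rotate i) s2) := by
  induction answers with
  | nil => intro i s0 s1 s2; simp [pvALoop, pvBScore]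
  | cons x rest ih =>
      intro i s0 s1 s2
      rw [pvALoop, pvBScore, pvBScore, pvBScore]
      rw [rot_step, rot_step, rot_step,
        List.rotate_rotate, List.rotate_rotate, List.rotate_rotate,
        rot_head pvPatA (by decide) i, rot_head pvPatB (by decide) i,
        rot_head pvPatC (by decide) i]
      exact ih (i + 1) _ _ _

-- ===== VERDICT (by name: the statement is the Claim_ definition above) =====
theorem solution_spec : Claim_equal_solution := by
  intro answers _
  show solution answers = solution_alt answers
  unfold solution solution_alt
  have h := loop_eq_scores answers 0 0 0 0
  simp only [List.rotate_zero] at h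
  rw [h]
  simp only [List.map, PySem.List.max?_id_cons, List.foldl, pvPatA, pvPatB, pvPatC, Option.getD_some, PySem.List.enumerate]
  rw [max_assoc]
  rfl
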